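-- pv_equiv track=rewrite | github.com/EKold/Kolder-can | python/proj.py | common_patterns
-- ===== SOURCE A (Python) =====
-- def common_patterns(D,common,names,phrases):
--     '''This function takes the password dictionary
--     (returned by the build_password_dictionary function) and three sets as
--     input and identifies common English words, first names, and phrases
--     contained within the password. It returns a dictionary with the password as
--     key and a list of patterns as the value'''
--     #have a dictionary
--     common_dict = {}
--     #for value in improted dictionary, set the value at index 0 to be the key
--     for value in D.values():
--         common_dict[value[0].lower()] = set()
--     for key, value in common_dict.items():
--         for word in common:
--             #check to see if the word in common file is in the key
--             if word.lower() in key: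
--                 #if it is in, then continue, else add it to the dictionary
--                 if word.lower() in common_dict.values():
--                     continue
--                 else:
--                     value.add(word.lower())
--         for word in names:
--             #same as word in common except now it is word in name file
--             if word.lower() in key:
--                 if word.lower() in common_dict.values():
--                     continue
--                 else:
--                     value.add(word.lower())
--         for word in phrases:
--             #same as word in common except now it is word in phrases file
--             if word.lower() in key:
--                 if word.lower() in common_dict.values():
--                     continue
--                 else:
--                     value.add(word.lower())
--     #sort the dictonary on the values and return it
--     for key, value in common_dict.items():
--         common_dict[key] = list(value)
--         common_dict[key] = sorted(value)
--     return common_dict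
-- ===== SOURCE B (Python) =====
-- def common_patterns(D, common, names, phrases):
--     # Text-driven matching: instead of scanning the pattern lists and running a
--     # substring search per pattern, build one hash set of lowered patterns and
--     # enumerate every substring of each password once, keeping those that are
--     # patterns (set intersection); then sort.
--     patterns = {w.lower() for w in common} | {w.lower() for w in names} | {w.lower() for w in phrases}
--     result = {}
--     for value in D.values():
--         key = value[0].lower()
--         n = len(key)
--         found = {key[i:j] for i in range(n + 1) for j in range(i, n + 1)}
--         result[key] = sorted(found & patterns)
--     return result
-- ===== Notes on version B (the rewrite author's own statement) =====
-- stated objective: faster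
-- what changed: B inverts the matching direction: instead of scanning every pattern per password and running a substring search on each, it builds one hash set of lowered patterns and enumerates every substring of each password once, keeping those found in the set (set intersection) and sorting the result; per-password work no longer depends on the number of patterns.
import Mathlib
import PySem

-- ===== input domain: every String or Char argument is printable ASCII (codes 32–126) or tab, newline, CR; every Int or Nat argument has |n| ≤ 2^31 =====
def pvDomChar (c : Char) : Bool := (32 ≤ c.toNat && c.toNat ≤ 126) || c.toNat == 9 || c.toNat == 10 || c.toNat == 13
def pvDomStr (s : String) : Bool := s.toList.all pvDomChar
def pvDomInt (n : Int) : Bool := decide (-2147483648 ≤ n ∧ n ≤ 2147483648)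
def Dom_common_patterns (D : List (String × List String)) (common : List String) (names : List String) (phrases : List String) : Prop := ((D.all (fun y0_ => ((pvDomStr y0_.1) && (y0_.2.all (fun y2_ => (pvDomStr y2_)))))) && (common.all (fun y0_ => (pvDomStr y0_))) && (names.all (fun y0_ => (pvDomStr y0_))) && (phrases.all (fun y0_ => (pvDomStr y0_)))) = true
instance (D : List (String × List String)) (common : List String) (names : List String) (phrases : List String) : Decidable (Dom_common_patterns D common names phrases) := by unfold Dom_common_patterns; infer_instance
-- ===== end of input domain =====

-- B inverts the matching direction: one hash set of lowered patterns, then every substring of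
-- each password is enumerated once and intersected with that set; A scans every pattern per
-- password with a substring search, builds a set per password and sorts it. Same return value on Pre_.

-- ===== PORT A =====
-- one of A's three identical inner loops: 'for word in ws: if word.lower() in key: if word.lower()
-- in common_dict.values(): continue else: value.add(word.lower())'.  The membership test compares a
-- str with each value (a set); str == set is always False in Python, so the test is always False —
-- ported as the literal always-false scan over cd.values (exact).
def cpWordLoop (cd : PySem.Dict String (List String)) (key : String)
    (ws : List String) (v : PySem.Set String) : PySem.Set String :=
  ws.foldl (fun acc word =>
    if PySem.Str.isIn (PySem.Str.lower word) key then
      if (cd.values).any (fun _ => false) then acc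
      else PySem.Set.add acc (PySem.Str.lower word)
    else acc) v

def common_patterns (D : List (String × List String)) (common : List String) (names : List String) (phrases : List String) : List (String × List String) :=
  -- common_dict = {}; for value in D.values(): common_dict[value[0].lower()] = set()
  let d0 : PySem.Dict String (List String) :=
    ((PySem.Dict.mk D).values).foldl
      (fun cd value => cd.insert (PySem.Str.lower (PySem.List.pyGetD value 0 "")) PySem.Set.empty)
      PySem.Dict.empty
  -- for key, value in common_dict.items(): the three word loops (mutate value in place)
  let d1 : PySem.Dict String (List String) :=
    d0.items.foldl (fun cd kv =>
      cd.insert kv.1 (cpWordLoop cd kv.1 phrases (cpWordLoop cd kv.1 names (cpWordLoop cd kv.1 common kv.2))))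
      d0
  -- for key, value in common_dict.items(): common_dict[key] = list(value); common_dict[key] = sorted(value)
  let d2 : PySem.Dict String (List String) :=
    d1.items.foldl (fun cd kv => cd.insert kv.1 (PySem.List.sorted kv.2 (fun x => x) false)) d1
  d2.items

-- ===== PORT B =====
-- patterns = {w.lower() for w in common} | {w.lower() for w in names} | {w.lower() for w in phrases}
def cpPatterns (common names phrases : List String) : PySem.Set String :=
  PySem.Set.union
    (PySem.Set.union (PySem.Set.ofList (common.map PySem.Str.lower))
      (PySem.Set.ofList (names.map PySem.Str.lower)))
    (PySem.Set.ofList (phrases.map PySem.Str.lower))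

-- {key[i:j] for i in range(n + 1) for j in range(i, n + 1)}
def cpSubstrings (key : String) : List String :=
  (PySem.List.pyRange 0 (PySem.Str.len key + 1) 1).flatMap (fun i =>
    (PySem.List.pyRange i (PySem.Str.len key + 1) 1).map (fun j =>
      PySem.Str.slice key (some i) (some j)))

def common_patterns_alt (D : List (String × List String)) (common : List String) (names : List String) (phrases : List String) : List (String × List String) :=
  let patterns : PySem.Set String := cpPatterns common names phrases
  -- result = {}; for value in D.values(): key = value[0].lower();
  --   found = {key[i:j] …}; result[key] = sorted(found & patterns)
  let result : PySem.Dict String (List String) :=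
    ((PySem.Dict.mk D).values).foldl
      (fun res value =>
        let key := PySem.Str.lower (PySem.List.pyGetD value 0 "")
        res.insert key
          (PySem.List.sorted (PySem.Set.inter (PySem.Set.ofList (cpSubstrings key)) patterns)
            (fun x => x) false))
      PySem.Dict.empty
  result.items

-- ===== PRECONDITION & SPEC =====
-- A evaluates value[0] on every value of D; it raises IndexError when some value list is empty
-- (B raises there too), so those inputs are excluded.
def Pre_common_patterns (D : List (String × List String)) (_common : List String) (_names : List String) (_phrases : List String) : Prop :=
  (D.all (fun p => !p.2.isEmpty)) = true
instance (D : List (String × List String)) (common : List String) (names : List String) (phrases : List String) : Decidable (Pre_common_patterns D common names phrases) := by unfold Pre_common_patterns; infer_instance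

def pvWitness_common_patterns : (List (String × List String)) × List String × List String × List String :=
  ([("Pass1", ["Password1", "me"]), ("ab", ["Ab"])], ["pass", "Word"], ["Ana"], ["s1"])

def Spec_common_patterns (D : List (String × List String)) (common : List String) (names : List String) (phrases : List String) (out : List (String × List String)) : Prop := out = common_patterns_alt D common names phrases
instance (D : List (String × List String)) (common : List String) (names : List String) (phrases : List String) (out : List (String × List String)) : Decidable (Spec_common_patterns D common names phrases out) := by unfold Spec_common_patterns; infer_instance

-- ===== CLAIM (what is proved, stated in full; the proofs are below) =====
def Claim_equal_common_patterns : Prop := ∀ (D : List (String × List String)) (common : List String) (names : List String) (phrases : List String), Dom_common_patterns D common names phrases → Pre_common_patterns D common names phrases → Spec_common_patterns D common names phrases (common_patterns D common names phrases)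

-- ===== LEMMAS AND PROOFS =====

-- the dead inner test collapses: each word loop is a conditional Set.add fold
theorem cpWordLoop_eq (cd : PySem.Dict String (List String)) (key : String)
    (ws : List String) (v : PySem.Set String) :
    cpWordLoop cd key ws v =
      ws.foldl (fun acc word =>
        if PySem.Str.isIn (PySem.Str.lower word) key then PySem.Set.add acc (PySem.Str.lower word)
        else acc) v := by
  unfold cpWordLoop
  exact PySem.List.foldl_congr_mem _ _ _ _ (fun acc word _ => by simp)

-- a conditional-add loop collects the matching lowered words
theorem fold_add_filter (key : String) (ws : List String) (v : PySem.Set String) :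
    ws.foldl (fun acc word =>
        if PySem.Str.isIn (PySem.Str.lower word) key then PySem.Set.add acc (PySem.Str.lower word)
        else acc) v =
      ((ws.map PySem.Str.lower).filter (fun w => PySem.Str.isIn w key)).foldl PySem.Set.add v := by
  induction ws generalizing v with
  | nil => rfl
  | cons w ws ih =>
    by_cases h : PySem.Str.isIn (PySem.Str.lower w) key = true
    · rw [List.foldl_cons, if_pos h, List.map_cons, List.filter_cons,
        if_pos (show (fun w => PySem.Str.isIn w key) (PySem.Str.lower w) = true from h),
        List.foldl_cons, ih]
    · rw [List.foldl_cons, if_neg h, List.map_cons, List.filter_cons,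
        if_neg (show ¬ (fun w => PySem.Str.isIn w key) (PySem.Str.lower w) = true from h), ih]

-- the three chained word loops from the empty set build exactly
-- Set.ofList of the matching lowered words of common ++ names ++ phrases
theorem cpWordLoop_three (cd : PySem.Dict String (List String)) (key : String)
    (common names phrases : List String) :
    cpWordLoop cd key phrases (cpWordLoop cd key names (cpWordLoop cd key common PySem.Set.empty)) =
      PySem.Set.ofList
        (((common ++ names ++ phrases).map PySem.Str.lower).filter (fun w => PySem.Str.isIn w key)) := by
  rw [cpWordLoop_eq, cpWordLoop_eq, cpWordLoop_eq, fold_add_filter, fold_add_filter,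
    fold_add_filter, PySem.Set.ofList_eq_foldl]
  simp [List.filter_append, List.foldl_append]

-- a fold of inserts whose value depends only on the computed key, into the empty dict
theorem items_foldl_insert_keymap {β : Type} (xs : List β) (key : β → String)
    (c : String → List String) :
    (xs.foldl (fun d x => d.insert (key x) (c (key x))) PySem.Dict.empty).items =
      (PySem.Set.ofList (xs.map key)).map (fun k => (k, c k)) := by
  induction xs using List.reverseRecOn with
  | nil => rfl
  | append_singleton xs x ih =>
    rw [List.foldl_append, List.foldl_cons, List.foldl_nil, List.map_append, List.map_singleton,
      PySem.Set.ofList_append_singleton]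
    set d := xs.foldl (fun d x => d.insert (key x) (c (key x))) PySem.Dict.empty with hd
    have hkeys : d.keys = PySem.Set.ofList (xs.map key) := by
      simp [PySem.Dict.keys, ih, List.map_map, Function.comp_def]
    by_cases hk : key x ∈ PySem.Set.ofList (xs.map key)
    · have hc : d.contains (key x) = true := by
        rw [PySem.Dict.contains_iff_mem_keys, hkeys]; exact hk
      rw [PySem.Dict.items_insert_of_contains d _ hc, ih,
        PySem.Set.add_of_mem hk, List.map_map]
      apply List.map_congr_left
      intro a ha
      by_cases hak : a = key x
      · subst hak; simp
      · simp [hak]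
    · have hc : d.contains (key x) = false := by
        rw [Bool.eq_false_iff, ne_eq, PySem.Dict.contains_iff_mem_keys, hkeys]; exact hk
      rw [PySem.Dict.items_insert_of_not_contains d _ hc, ih,
        PySem.Set.add_of_not_mem hk, List.map_append, List.map_singleton]

-- overwriting every key of a dict in a fold rewrites each item's value in place
theorem items_foldl_overwrite (S : List String) (c' : String → List String) :
    ∀ (d : PySem.Dict String (List String)), (∀ k ∈ S, d.contains k = true) →
    (S.foldl (fun d k => d.insert k (c' k)) d).items =
      d.items.map (fun p => if p.1 ∈ S then (p.1, c' p.1) else p) := by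
  induction S with
  | nil => intro d _; simp
  | cons k S ih =>
    intro d hsub
    rw [List.foldl_cons]
    have hck : d.contains k = true := hsub k (List.mem_cons_self)
    have hkeys : (d.insert k (c' k)).keys = d.keys := by
      simp only [PySem.Dict.keys, PySem.Dict.items_insert_of_contains d _ hck, List.map_map]
      apply List.map_congr_left
      intro p _
      by_cases hpk : p.1 = k <;> simp [hpk]
    rw [ih (d.insert k (c' k)) (fun a ha => by
      rw [PySem.Dict.contains_iff_mem_keys, hkeys, ← PySem.Dict.contains_iff_mem_keys]
      exact hsub a (List.mem_cons_of_mem _ ha))]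
    rw [PySem.Dict.items_insert_of_contains d _ hck, List.map_map]
    apply List.map_congr_left
    intro p _
    by_cases hpk : p.1 = k
    · simp [hpk]
    · by_cases hpS : p.1 ∈ S <;> simp [hpk, hpS]

-- characterisation of port A's result
theorem portA_items (D : List (String × List String)) (common names phrases : List String) :
    common_patterns D common names phrases =
      (PySem.Set.ofList (((PySem.Dict.mk D).values).map
          (fun v => PySem.Str.lower (PySem.List.pyGetD v 0 "")))).map
        (fun k => (k, PySem.List.sorted
            (PySem.Set.ofList (((common ++ names ++ phrases).map PySem.Str.lower).filter
              (fun w => PySem.Str.isIn w k))) (fun x => x) false)) := by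
  unfold common_patterns
  set keyOf := fun v : List String => PySem.Str.lower (PySem.List.pyGetD v 0 "") with hkeyOf
  set vals := (PySem.Dict.mk D).values with hvals
  set S := PySem.Set.ofList (vals.map keyOf) with hS
  set Aset := fun k => PySem.Set.ofList (((common ++ names ++ phrases).map PySem.Str.lower).filter
      (fun w => PySem.Str.isIn w k)) with hAset
  set d0 := vals.foldl (fun cd value => cd.insert (keyOf value) PySem.Set.empty) PySem.Dict.empty with hd0
  have h0 : d0.items = S.map (fun k => (k, ([] : List String))) :=
    items_foldl_insert_keymap vals keyOf (fun _ => [])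
  have h0k : d0.keys = S := by
    simp [PySem.Dict.keys, h0, List.map_map, Function.comp_def]
  -- step 1: the word loops
  have h1 : (d0.items.foldl (fun cd kv =>
      cd.insert kv.1 (cpWordLoop cd kv.1 phrases (cpWordLoop cd kv.1 names (cpWordLoop cd kv.1 common kv.2)))) d0).items
      = S.map (fun k => (k, (Aset k : List String))) := by
    rw [h0, List.foldl_map]
    rw [PySem.List.foldl_congr_mem S
      (fun cd k => cd.insert (k, ([] : List String)).1 (cpWordLoop cd (k, ([] : List String)).1 phrases
        (cpWordLoop cd (k, ([] : List String)).1 names (cpWordLoop cd (k, ([] : List String)).1 common (k, ([] : List String)).2))))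
      (fun cd k => cd.insert k (Aset k)) d0
      (fun cd k _ => by
        show cd.insert k (cpWordLoop cd k phrases (cpWordLoop cd k names (cpWordLoop cd k common PySem.Set.empty)))
          = cd.insert k (Aset k)
        rw [cpWordLoop_three, hAset])]
    rw [items_foldl_overwrite S Aset d0 (fun k hk => by
      rw [PySem.Dict.contains_iff_mem_keys, h0k]; exact hk), h0, List.map_map]
    apply List.map_congr_left
    intro k hk
    simp [hk]
  set d1 := d0.items.foldl (fun cd kv =>
      cd.insert kv.1 (cpWordLoop cd kv.1 phrases (cpWordLoop cd kv.1 names (cpWordLoop cd kv.1 common kv.2)))) d0 with hd1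
  have h1k : d1.keys = S := by
    simp [PySem.Dict.keys, h1, List.map_map, Function.comp_def]
  -- step 2: the sorting loop
  have h2 : (d1.items.foldl (fun cd kv =>
      cd.insert kv.1 (PySem.List.sorted kv.2 (fun x => x) false)) d1).items
      = S.map (fun k => (k, PySem.List.sorted (Aset k) (fun x => x) false)) := by
    rw [h1, List.foldl_map]
    rw [PySem.List.foldl_congr_mem S
      (fun cd (k : String) => cd.insert (k, (Aset k : List String)).1 (PySem.List.sorted (k, (Aset k : List String)).2 (fun x => x) false))
      (fun cd k => cd.insert k (PySem.List.sorted (Aset k) (fun x => x) false)) d1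
      (fun cd k _ => rfl)]
    rw [items_foldl_overwrite S (fun k => PySem.List.sorted (Aset k) (fun x => x) false) d1 (fun k hk => by
      rw [PySem.Dict.contains_iff_mem_keys, h1k]; exact hk), h1, List.map_map]
    apply List.map_congr_left
    intro k hk
    simp [hk]
  exact h2

-- characterisation of port B's result
theorem portB_items (D : List (String × List String)) (common names phrases : List String) :
    common_patterns_alt D common names phrases =
      (PySem.Set.ofList (((PySem.Dict.mk D).values).map
          (fun v => PySem.Str.lower (PySem.List.pyGetD v 0 "")))).map
        (fun k => (k, PySem.List.sorted
            (PySem.Set.inter (PySem.Set.ofList (cpSubstrings k)) (cpPatterns common names phrases))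
            (fun x => x) false)) := by
  unfold common_patterns_alt
  exact items_foldl_insert_keymap ((PySem.Dict.mk D).values)
    (fun v => PySem.Str.lower (PySem.List.pyGetD v 0 ""))
    (fun k => PySem.List.sorted
      (PySem.Set.inter (PySem.Set.ofList (cpSubstrings k)) (cpPatterns common names phrases))
      (fun x => x) false)

-- the substring comprehension enumerates exactly the infixes of the key
theorem mem_cpSubstrings (k x : String) :
    x ∈ cpSubstrings k ↔ x.toList <:+: k.toList := by
  unfold cpSubstrings
  simp only [List.mem_flatMap, List.mem_map, PySem.List.mem_pyRange_one, PySem.Str.len_eq]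
  constructor
  · rintro ⟨i, ⟨hi0, _⟩, j, ⟨⟨hij, _⟩, rfl⟩⟩
    have ht : (PySem.Str.slice k (some i) (some j)).toList =
        (k.toList.drop i.toNat).take (j.toNat - i.toNat) := by
      simp [PySem.Str.slice, PySem.List.slice_toNat k.toList hi0 (le_trans hi0 hij)]
    rw [ht]
    exact ((k.toList.drop i.toNat).take_prefix _).isInfix.trans (k.toList.drop_suffix i.toNat).isInfix
  · rintro ⟨s, t, h⟩
    have hlen : k.toList.length = s.length + x.toList.length + t.length := by
      rw [← h]; simp; omega
    refine ⟨(s.length : Int), ⟨by positivity, by omega⟩,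
      ((s.length + x.toList.length : Nat) : Int), ⟨⟨by exact_mod_cast by omega, by push_cast; omega⟩, ?_⟩⟩
    apply String.toList_inj.mp
    have ht : (PySem.Str.slice k (some (s.length : Int)) (some ((s.length + x.toList.length : Nat) : Int))).toList =
        (k.toList.drop s.length).take x.toList.length := by
      have hsl := PySem.List.slice_natCast_add k.toList s.length x.toList.length
      simp only [String.length_toList] at hsl
      simp [PySem.Str.slice, hsl]
    rw [ht, ← h, List.append_assoc, List.drop_left, List.take_left]

-- patterns-set membership = membership in the lowered concatenation
theorem mem_cpPatterns (common names phrases : List String) (x : String) :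
    x ∈ cpPatterns common names phrases ↔ x ∈ (common ++ names ++ phrases).map PySem.Str.lower := by
  unfold cpPatterns
  simp [PySem.Set.mem_union, PySem.Set.mem_ofList, List.mem_append, or_assoc]

-- per key: sorted(substrings(key) & patterns) = sorted(set of matching lowered words)
theorem sorted_inter_eq (common names phrases : List String) (k : String) :
    PySem.List.sorted
        (PySem.Set.inter (PySem.Set.ofList (cpSubstrings k)) (cpPatterns common names phrases))
        (fun x => x) false =
      PySem.List.sorted
        (PySem.Set.ofList (((common ++ names ++ phrases).map PySem.Str.lower).filter
          (fun w => PySem.Str.isIn w k))) (fun x => x) false := by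
  apply PySem.List.sorted_eq_of_perm_of_pairwise_lt
  · -- Perm: sorted LHS-arg target list ~ inter list; both sides nodup with the same members
    refine ((PySem.List.sorted_perm _ _ _).trans ?_)
    apply (List.perm_ext_iff_of_nodup (PySem.Set.nodup_ofList _) ?_).mpr
    · intro x
      rw [PySem.Set.mem_ofList, List.mem_filter, PySem.Set.mem_inter, PySem.Set.mem_ofList,
        mem_cpSubstrings, mem_cpPatterns, ← PySem.Str.isIn_iff_infix]
      exact ⟨fun ⟨hm, hin⟩ => ⟨hin, hm⟩, fun ⟨hin, hm⟩ => ⟨hm, hin⟩⟩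
    · show ((PySem.Set.ofList (cpSubstrings k)).filter _).Nodup
      exact (PySem.Set.nodup_ofList _).filter _
  · exact PySem.List.sorted_ofList_pairwise_lt _

-- ===== VERDICT (by name: the statement is the Claim_ definition above) =====
theorem common_patterns_spec : Claim_equal_common_patterns := by
  intro D common names phrases _ _
  unfold Spec_common_patterns
  rw [portA_items, portB_items]
  apply List.map_congr_left
  intro k _
  exact congrArg _ (sorted_inter_eq common names phrases k).symm
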